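-- pv_equiv track=rewrite | github.com/gitlearning170921/aiword | webapp/routes.py | _is_valid_doc_link
-- ===== SOURCE A (Python) =====
-- def _normalize_doc_link(line: str) -> str:
--     """截断 https 之前的内容，返回从 http(s) 开始的有效可打开地址。"""
--     line = (line or "").strip()
--     if not line:
--         return line
--     lower = line.lower()
--     for prefix in ("https://", "http://"):
--         idx = lower.find(prefix)
--         if idx != -1:
--             return line[idx:]
--     return line
--
-- def _is_valid_doc_link(value: str) -> bool:
--     """校验文档链接是否合理：每行经归一化后需以 http:// 或 https:// 开头。"""
--     if not value or not value.strip():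
--         return True
--     for line in value.strip().split("\n"):
--         ln = (line or "").strip()
--         if not ln:
--             continue
--         normalized = _normalize_doc_link(ln)
--         lower = normalized.lower()
--         if not (lower.startswith("http://") or lower.startswith("https://")):
--             return False
--     return True
-- ===== SOURCE B (Python) =====
-- def _is_valid_doc_link(value: str) -> bool:
--     """Single streaming pass over the characters: a sliding 8-char window detects
--     http(s):// occurrences; at each line boundary the line must have been blank or
--     have had a scheme occurrence. No splitting, no per-line substring search."""
--     if not value or not value.strip():
--         return True
--     seen = False      # current line contains a non-whitespace char
--     matched = False   # current line contains http:// or https://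
--     window = ""       # last 8 chars of the current line, lowercased
--     for ch in value.strip() + "\n":
--         if ch == "\n":
--             if seen and not matched:
--                 return False
--             seen = False
--             matched = False
--             window = ""
--         else:
--             if not ch.isspace():
--                 seen = True
--             window = (window + ch.lower())[-8:]
--             if window.endswith("http://") or window.endswith("https://"):
--                 matched = True
--     return True
-- ===== Notes on version B (the rewrite author's own statement) =====
-- stated objective: alternative
-- what changed: Replaces A's split-into-lines + per-line normalize(find/slice)+startswith pipeline with a single streaming character scan: an 8-char sliding window detects http(s):// occurrences and per-line flags (non-blank seen / scheme matched) are checked at each newline, with no split, no substring search and no normalized string.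
import Mathlib
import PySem

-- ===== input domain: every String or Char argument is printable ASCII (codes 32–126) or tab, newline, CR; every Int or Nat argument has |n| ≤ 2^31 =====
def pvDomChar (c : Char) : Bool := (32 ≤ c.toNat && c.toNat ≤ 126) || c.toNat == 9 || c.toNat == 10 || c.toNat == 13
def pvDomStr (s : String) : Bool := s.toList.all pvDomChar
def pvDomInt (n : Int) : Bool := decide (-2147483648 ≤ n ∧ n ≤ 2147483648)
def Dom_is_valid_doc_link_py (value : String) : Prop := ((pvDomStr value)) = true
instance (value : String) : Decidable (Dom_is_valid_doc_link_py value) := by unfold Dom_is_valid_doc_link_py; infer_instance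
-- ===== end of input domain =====

-- B replaces A's split-into-lines + normalize(find/slice)+startswith pipeline by one streaming
-- character scan with an 8-char sliding window and per-line flags; return values only, no side effects.

-- ===== PORT A =====
-- _normalize_doc_link, transliterated on List Char (Str.* are thin wrappers over Chars.* on toList)
def pvNormA (line : List Char) : List Char :=
  let line := PySem.Chars.strip line
  if line = [] then line
  else
    let lower := PySem.Chars.lower line
    let idx1 := PySem.Chars.find lower "https://".toList
    if idx1 ≠ -1 then PySem.List.slice line (some idx1) none
    else
      let idx2 := PySem.Chars.find lower "http://".toList
      if idx2 ≠ -1 then PySem.List.slice line (some idx2) none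
      else line

-- the 'for line in value.strip().split("\n")' loop of _is_valid_doc_link
def pvLoopA : List (List Char) → Bool
  | [] => true
  | line :: rest =>
    let ln := PySem.Chars.strip line
    if ln = [] then pvLoopA rest
    else
      let normalized := pvNormA ln
      let lw := PySem.Chars.lower normalized
      if !(PySem.Chars.startswith lw "http://".toList || PySem.Chars.startswith lw "https://".toList) then false
      else pvLoopA rest

def is_valid_doc_link_py (value : String) : Bool :=
  if value = "" || PySem.Chars.strip value.toList = [] then true
  else pvLoopA (PySem.Chars.splitOn (PySem.Chars.strip value.toList) "\n".toList)

-- ===== PORT B =====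
-- the streaming 'for ch in value.strip() + "\n"' loop of Source B: state (seen, matched, window)
def pvLoopB : List Char → Bool → Bool → List Char → Bool
  | [], _, _, _ => true
  | c :: rest, seen, matched, window =>
    if c = '\n' then
      if seen && !matched then false
      else pvLoopB rest false false []
    else
      let seen' := if !(PySem.Chars.isspace c) then true else seen
      let window' := PySem.List.slice (window ++ [PySem.Chars.lowerChar c]) (some (-8)) none
      let matched' :=
        if PySem.Chars.endswith window' "http://".toList ||
           PySem.Chars.endswith window' "https://".toList then true else matched
      pvLoopB rest seen' matched' window'

def is_valid_doc_link_py_alt (value : String) : Bool :=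
  if value = "" || PySem.Chars.strip value.toList = [] then true
  else pvLoopB (PySem.Chars.strip value.toList ++ "\n".toList) false false []

-- ===== PRECONDITION & SPEC =====
def Spec_is_valid_doc_link_py (value : String) (out : Bool) : Prop := out = is_valid_doc_link_py_alt value
instance (value : String) (out : Bool) : Decidable (Spec_is_valid_doc_link_py value out) := by unfold Spec_is_valid_doc_link_py; infer_instance

-- ===== CLAIM (what is proved, stated in full; the proofs are below) =====
def Claim_equal_is_valid_doc_link_py : Prop := ∀ (value : String), Dom_is_valid_doc_link_py value → Spec_is_valid_doc_link_py value (is_valid_doc_link_py value)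

-- ===== LEMMAS AND PROOFS =====

-- proof-side vocabulary ------------------------------------------------------
-- '"http://" in s or "https://" in s' on the lowered characters
def pvMatchOf (l : List Char) : Bool :=
  PySem.Chars.isIn "http://".toList (PySem.Chars.lower l) ||
  PySem.Chars.isIn "https://".toList (PySem.Chars.lower l)

def pvSeenOf (l : List Char) : Bool := l.any (fun c => !PySem.Chars.isspace c)

def pvTakeLast8 (w : List Char) : List Char := w.drop (w.length - 8)

-- structural characterization of splitOn on separator "\n"
def pvSpNl : List Char → List (List Char)
  | [] => [[]]
  | c :: r =>
    if c = '\n' then [] :: pvSpNl r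
    else
      match pvSpNl r with
      | [] => [[c]]
      | l :: ls => (c :: l) :: ls

lemma pvSpNl_ne_nil (t : List Char) : pvSpNl t ≠ [] := by
  cases t with
  | nil => simp [pvSpNl]
  | cons c r =>
    simp only [pvSpNl]
    split
    · simp
    · split <;> simp

def pvConsHead (x : List Char) : List (List Char) → List (List Char)
  | [] => [x]
  | l :: ls => (x ++ l) :: ls

lemma pvSplitOn_go_eq (l : List Char) : ∀ (fuel : Nat) (cur : List Char) (acc : List (List Char)),
    l.length < fuel →
    PySem.Chars.splitOn.go ['\n'] fuel l cur acc = acc.reverse ++ pvConsHead cur.reverse (pvSpNl l) := by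
  induction l with
  | nil =>
    intro fuel cur acc h
    cases fuel with
    | zero => omega
    | succ f => simp [PySem.Chars.splitOn.go, pvSpNl, pvConsHead]
  | cons c rest ih =>
    intro fuel cur acc h
    cases fuel with
    | zero => omega
    | succ f =>
      by_cases hc : c = '\n'
      · subst hc
        have hp : List.isPrefixOf ['\n'] ('\n' :: rest) = true := by simp [List.isPrefixOf]
        rw [PySem.Chars.splitOn.go]
        simp only [hp, if_pos]
        rw [show List.drop (List.length ['\n']) ('\n' :: rest) = rest by simp]
        rw [ih f [] (cur.reverse :: acc) (by simpa using h)]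
        rcases List.exists_cons_of_ne_nil (pvSpNl_ne_nil rest) with ⟨hd, tl, he⟩
        simp [pvSpNl, he, pvConsHead]
      · have hp : List.isPrefixOf ['\n'] (c :: rest) = false := by
          simp [List.isPrefixOf]; exact fun hh => absurd hh.symm hc
        rw [PySem.Chars.splitOn.go]
        simp only [hp]
        rw [if_neg (by simp)]
        rw [ih f (c :: cur) acc (by simpa using h)]
        rcases List.exists_cons_of_ne_nil (pvSpNl_ne_nil rest) with ⟨hd, tl, he⟩
        simp [pvSpNl, he, hc, pvConsHead]

lemma pvSplitOn_nl (t : List Char) : PySem.Chars.splitOn t "\n".toList = pvSpNl t := by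
  rw [show ("\n".toList : List Char) = ['\n'] from rfl]
  rw [PySem.Chars.splitOn, pvSplitOn_go_eq t (t.length+1) [] [] (by omega)]
  rcases List.exists_cons_of_ne_nil (pvSpNl_ne_nil t) with ⟨hd, tl, he⟩
  simp [he, pvConsHead]

lemma pvSpNl_no_nl (t : List Char) (h : '\n' ∉ t) : pvSpNl t = [t] := by
  induction t with
  | nil => rfl
  | cons c r ih =>
    simp only [List.mem_cons, not_or] at h
    rw [pvSpNl, if_neg (fun hh => h.1 hh.symm), ih h.2]

lemma pvSpNl_append (a b : List Char) (h : '\n' ∉ a) :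
    pvSpNl (a ++ '\n' :: b) = a :: pvSpNl b := by
  induction a with
  | nil => simp [pvSpNl]
  | cons c r ih =>
    simp only [List.mem_cons, not_or] at h
    rw [List.cons_append, pvSpNl, if_neg (fun hh => h.1 hh.symm), ih h.2]

-- strip / whitespace facts ---------------------------------------------------
lemma dropWhile_dropWhile {α : Type} (p : α → Bool) (l : List α) :
    List.dropWhile p (List.dropWhile p l) = List.dropWhile p l := by
  induction l with
  | nil => rfl
  | cons a l ih =>
    by_cases h : p a = true
    · simp [h, ih]
    · simp [h]

lemma lstrip_lstrip (s : List Char) :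
    PySem.Chars.lstrip (PySem.Chars.lstrip s) = PySem.Chars.lstrip s := by
  simp [PySem.Chars.lstrip, dropWhile_dropWhile]

lemma rstrip_rstrip (s : List Char) :
    PySem.Chars.rstrip (PySem.Chars.rstrip s) = PySem.Chars.rstrip s := by
  simp [PySem.Chars.rstrip, dropWhile_dropWhile]

lemma lstrip_of_prefix (t u : List Char) (ht : PySem.Chars.lstrip t = t) (hu : u <+: t) :
    PySem.Chars.lstrip u = u := by
  cases u with
  | nil => rfl
  | cons a u' =>
    obtain ⟨r, hr⟩ := hu
    by_cases h : PySem.Chars.isspace a = true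
    · exfalso
      rw [← hr] at ht
      simp [PySem.Chars.lstrip, h] at ht
      have hlen := List.length_dropWhile_le PySem.Chars.isspace (u' ++ r)
      have h2 := congrArg List.length ht
      simp [List.length_append] at h2 hlen
      omega
    · simp [PySem.Chars.lstrip, h]

lemma rstrip_prefix (t : List Char) : PySem.Chars.rstrip t <+: t := by
  have h : List.dropWhile PySem.Chars.isspace t.reverse <:+ t.reverse :=
    List.dropWhile_suffix _
  have := h.reverse
  simpa [PySem.Chars.rstrip] using this

lemma strip_strip (s : List Char) :
    PySem.Chars.strip (PySem.Chars.strip s) = PySem.Chars.strip s := by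
  have h2 : PySem.Chars.lstrip (PySem.Chars.rstrip (PySem.Chars.lstrip s))
      = PySem.Chars.rstrip (PySem.Chars.lstrip s) :=
    lstrip_of_prefix _ _ (lstrip_lstrip s) (rstrip_prefix _)
  simp only [PySem.Chars.strip, h2, rstrip_rstrip]

lemma strip_eq_nil_iff (l : List Char) :
    PySem.Chars.strip l = [] ↔ l.all PySem.Chars.isspace := by
  rw [PySem.Chars.strip, PySem.Chars.rstrip, PySem.Chars.lstrip]
  rw [List.reverse_eq_nil_iff, List.dropWhile_eq_nil_iff, List.all_eq_true]
  constructor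
  · intro h c hc
    have hsplit : c ∈ List.takeWhile PySem.Chars.isspace l ++ List.dropWhile PySem.Chars.isspace l := by
      rw [List.takeWhile_append_dropWhile]; exact hc
    rcases List.mem_append.mp hsplit with h1 | h2
    · exact List.mem_takeWhile_imp h1
    · exact h c (by simpa using h2)
  · intro h c hc
    have hc2 : c ∈ l := (List.dropWhile_sublist _).subset (by simpa using hc)
    exact h c hc2

set_option maxRecDepth 2000 in
lemma isspace_lowerChar (c : Char) :
    PySem.Chars.isspace (PySem.Chars.lowerChar c) = PySem.Chars.isspace c := by
  rw [PySem.Chars.lowerChar]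
  split
  · rename_i h
    have hb : 65 ≤ c.toNat ∧ c.toNat ≤ 90 := by
      simpa [PySem.Chars.isupper] using h
    have hv : (Char.ofNat (c.toNat + 32)).toNat = c.toNat + 32 := by
      have hval : (c.toNat + 32).isValidChar := Or.inl (by omega)
      rw [Char.ofNat, dif_pos hval]
      simp only [Char.ofNatAux, Char.toNat, UInt32.toNat, BitVec.toNat_ofNatLT]
    obtain ⟨h1, h2⟩ := hb
    have e1 : PySem.Chars.isspace (Char.ofNat (c.toNat + 32)) = false := by
      simp only [PySem.Chars.isspace, hv, Bool.or_eq_false_iff, Bool.and_eq_false_iff,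
        decide_eq_false_iff_not]
      omega
    have e2 : PySem.Chars.isspace c = false := by
      simp only [PySem.Chars.isspace, Bool.or_eq_false_iff, Bool.and_eq_false_iff,
        decide_eq_false_iff_not]
      omega
    rw [e1, e2]
  · rfl

lemma lower_strip (l : List Char) :
    PySem.Chars.lower (PySem.Chars.strip l) = PySem.Chars.strip (PySem.Chars.lower l) := by
  have hd : ∀ (x : List Char), List.dropWhile PySem.Chars.isspace (List.map PySem.Chars.lowerChar x)
      = List.map PySem.Chars.lowerChar (List.dropWhile PySem.Chars.isspace x) := by
    intro x
    rw [List.dropWhile_map]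
    have hfun : (PySem.Chars.isspace ∘ PySem.Chars.lowerChar) = PySem.Chars.isspace := by
      funext c
      simp [Function.comp, isspace_lowerChar]
    rw [hfun]
  simp only [PySem.Chars.strip, PySem.Chars.lower, PySem.Chars.lstrip, PySem.Chars.rstrip]
  rw [hd, ← List.map_reverse, hd, List.map_reverse]

-- infix / suffix facts -------------------------------------------------------
lemma infix_dropWhile (p : Char → Bool) (m x : List Char) (hm : m ≠ [])
    (hns : ∀ c ∈ m, p c = false) (h : m <:+: x) : m <:+: List.dropWhile p x := by
  induction x with
  | nil => simpa using h
  | cons c r ih =>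
    by_cases hc : p c = true
    · rw [List.dropWhile_cons_of_pos hc]
      rcases (List.infix_cons_iff).mp h with hp | hi
      · exfalso
        rcases List.exists_cons_of_ne_nil hm with ⟨a, m', rfl⟩
        rcases hp with ⟨tl, htl⟩
        have ha : a = c := by
          have := congrArg (fun l => l.head?) htl
          simpa using this
        subst ha
        rw [hns a (by simp)] at hc
        exact Bool.false_ne_true hc
      · exact ih hi
    · rwa [List.dropWhile_cons_of_neg hc]

lemma infix_strip (m x : List Char) (hm : m ≠ [])
    (hns : ∀ c ∈ m, PySem.Chars.isspace c = false) : m <:+: PySem.Chars.strip x ↔ m <:+: x := by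
  constructor
  · intro h
    have h1 : PySem.Chars.strip x <:+: x := by
      have hp : PySem.Chars.strip x <+: PySem.Chars.lstrip x := rstrip_prefix _
      have hs : PySem.Chars.lstrip x <:+ x := List.dropWhile_suffix _
      exact hp.isInfix.trans hs.isInfix
    exact h.trans h1
  · intro h
    have h1 : m <:+: PySem.Chars.lstrip x :=
      infix_dropWhile _ m x hm hns h
    have h2 : m.reverse <:+: (PySem.Chars.lstrip x).reverse :=
      List.reverse_infix.mpr h1
    have h3 : m.reverse <:+: List.dropWhile PySem.Chars.isspace (PySem.Chars.lstrip x).reverse :=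
      infix_dropWhile _ _ _ (by simpa using hm) (fun c hc => hns c (by simpa using hc)) h2
    have h4 : m.reverse <:+: (PySem.Chars.rstrip (PySem.Chars.lstrip x)).reverse := by
      rw [PySem.Chars.rstrip, List.reverse_reverse]
      exact h3
    exact List.reverse_infix.mp h4

lemma infix_snoc (m s : List Char) (c : Char) :
    m <:+: s ++ [c] ↔ m <:+: s ∨ m <:+ s ++ [c] := by
  constructor
  · rintro ⟨u, v, huv⟩
    rcases List.eq_nil_or_concat v with rfl | ⟨w, d, rfl⟩
    · right; exact ⟨u, by simpa using huv⟩
    · left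
      have h2 : (u ++ m ++ w) ++ [d] = s ++ [c] := by simpa [List.append_assoc] using huv
      have h3 : u ++ m ++ w = s := List.append_inj_left' h2 rfl
      exact ⟨u, w, h3⟩
  · rintro (h | h)
    · exact h.trans (List.prefix_append s [c]).isInfix
    · exact h.isInfix

lemma suffix_takeLast8 (m w : List Char) (hm : m.length ≤ 8) :
    m <:+ pvTakeLast8 w ↔ m <:+ w := by
  unfold pvTakeLast8
  constructor
  · intro h
    exact h.trans (List.drop_suffix _ _)
  · rintro ⟨a, rfl⟩
    have hlen : (a ++ m).length - 8 ≤ a.length := by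
      simp [List.length_append]; omega
    rw [List.drop_append_of_le_length hlen]
    exact List.suffix_append _ m

lemma takeLast8_append (x y : List Char) :
    pvTakeLast8 (pvTakeLast8 x ++ y) = pvTakeLast8 (x ++ y) := by
  unfold pvTakeLast8
  by_cases hx : x.length ≤ 8
  · rw [show x.length - 8 = 0 by omega, List.drop_zero]
  · have hx' : (List.drop (x.length - 8) x).length = 8 := by
      rw [List.length_drop]; omega
    have hlt : (List.take (x.length - 8) x).length = x.length - 8 := by
      rw [List.length_take]; omega
    have key : List.drop y.length (List.drop (x.length - 8) x ++ y)
        = List.drop ((x.length + y.length) - 8) (x ++ y) := by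
      conv_rhs => rw [(List.take_append_drop (x.length - 8) x).symm, List.append_assoc]
      simp only [List.length_append, hlt, hx']
      rw [show x.length - 8 + 8 + y.length - 8 = (List.take (x.length - 8) x).length + y.length by
        rw [hlt]; omega]
      rw [← List.drop_drop, List.drop_left]
    rw [List.length_append, hx', show 8 + y.length - 8 = y.length by omega, key,
      List.length_append]

lemma slice_neg8 (w : List Char) :
    PySem.List.slice w (some (-8)) none = pvTakeLast8 w := by
  rw [PySem.List.slice_from_neg_ofNat w 8 (by omega)]
  rfl

-- per-line equivalence for A: normalize-then-startswith equals the substring test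
def pvLineOk (ln : List Char) : Bool :=
  PySem.Chars.isIn "http://".toList (PySem.Chars.lower ln) ||
  PySem.Chars.isIn "https://".toList (PySem.Chars.lower ln)

lemma line_check_eq (s : List Char) (hs : PySem.Chars.strip s = s) (hne : s ≠ []) :
    (PySem.Chars.startswith (PySem.Chars.lower (pvNormA s)) "http://".toList ||
     PySem.Chars.startswith (PySem.Chars.lower (pvNormA s)) "https://".toList) = pvLineOk s := by
  by_cases h8 : PySem.Chars.find (PySem.Chars.lower s) "https://".toList = -1
  · by_cases h7 : PySem.Chars.find (PySem.Chars.lower s) "http://".toList = -1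
    · have hn : pvNormA s = s := by
        simp only [pvNormA, hs]
        rw [if_neg hne, if_neg (not_not_intro h8), if_neg (not_not_intro h7)]
      have hi8 : ¬ ("https://".toList <:+: PySem.Chars.lower s) :=
        (PySem.Chars.find_eq_neg_one_iff _ _).mp h8
      have hi7 : ¬ ("http://".toList <:+: PySem.Chars.lower s) :=
        (PySem.Chars.find_eq_neg_one_iff _ _).mp h7
      have hsw7 : PySem.Chars.startswith (PySem.Chars.lower s) "http://".toList = false := by
        by_contra hc
        exact hi7 ((PySem.Chars.startswith_iff _ _).mp (by simpa using hc)).isInfix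
      have hsw8 : PySem.Chars.startswith (PySem.Chars.lower s) "https://".toList = false := by
        by_contra hc
        exact hi8 ((PySem.Chars.startswith_iff _ _).mp (by simpa using hc)).isInfix
      have hin7 : PySem.Chars.isIn "http://".toList (PySem.Chars.lower s) = false := by
        by_contra hc
        exact hi7 ((PySem.Chars.isIn_iff_infix _ _).mp (by simpa using hc))
      have hin8 : PySem.Chars.isIn "https://".toList (PySem.Chars.lower s) = false := by
        by_contra hc
        exact hi8 ((PySem.Chars.isIn_iff_infix _ _).mp (by simpa using hc))
      rw [hn]
      unfold pvLineOk
      rw [hsw7, hsw8, hin7, hin8]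
    · have hpos : 0 ≤ PySem.Chars.find (PySem.Chars.lower s) "http://".toList :=
        (PySem.Chars.find_nonneg_iff _ _).mpr ((PySem.Chars.find_ne_neg_one_iff _ _).mp h7)
      have hn : pvNormA s =
          s.drop (PySem.Chars.find (PySem.Chars.lower s) "http://".toList).toNat := by
        simp only [pvNormA, hs]
        rw [if_neg hne, if_neg (not_not_intro h8), if_pos h7, PySem.List.slice_from _ hpos]
      have hlow : PySem.Chars.lower (pvNormA s) =
          (PySem.Chars.lower s).drop
            (PySem.Chars.find (PySem.Chars.lower s) "http://".toList).toNat := by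
        rw [hn]; simp [PySem.Chars.lower, List.map_drop]
      have hsw : PySem.Chars.startswith (PySem.Chars.lower (pvNormA s)) "http://".toList = true := by
        rw [hlow]
        exact (PySem.Chars.startswith_iff _ _).mpr (PySem.Chars.find_spec hpos).1
      have hin : PySem.Chars.isIn "http://".toList (PySem.Chars.lower s) = true :=
        (PySem.Chars.isIn_iff_infix _ _).mpr ((PySem.Chars.find_ne_neg_one_iff _ _).mp h7)
      unfold pvLineOk
      rw [hsw, hin, Bool.true_or, Bool.true_or]
  · have hpos : 0 ≤ PySem.Chars.find (PySem.Chars.lower s) "https://".toList :=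
      (PySem.Chars.find_nonneg_iff _ _).mpr ((PySem.Chars.find_ne_neg_one_iff _ _).mp h8)
    have hn : pvNormA s =
        s.drop (PySem.Chars.find (PySem.Chars.lower s) "https://".toList).toNat := by
      simp only [pvNormA, hs]
      rw [if_neg hne, if_pos h8, PySem.List.slice_from _ hpos]
    have hlow : PySem.Chars.lower (pvNormA s) =
        (PySem.Chars.lower s).drop
          (PySem.Chars.find (PySem.Chars.lower s) "https://".toList).toNat := by
      rw [hn]; simp [PySem.Chars.lower, List.map_drop]
    have hsw : PySem.Chars.startswith (PySem.Chars.lower (pvNormA s)) "https://".toList = true := by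
      rw [hlow]
      exact (PySem.Chars.startswith_iff _ _).mpr (PySem.Chars.find_spec hpos).1
    have hin : PySem.Chars.isIn "https://".toList (PySem.Chars.lower s) = true :=
      (PySem.Chars.isIn_iff_infix _ _).mpr ((PySem.Chars.find_ne_neg_one_iff _ _).mp h8)
    unfold pvLineOk
    rw [hsw, hin, Bool.or_true, Bool.or_true]

-- markers are non-empty and whitespace-free, so strip does not affect their occurrence
lemma isIn_strip_marker (m x : List Char) (hm : m ≠ [])
    (hns : ∀ c ∈ m, PySem.Chars.isspace c = false) :
    PySem.Chars.isIn m (PySem.Chars.strip x) = PySem.Chars.isIn m x := by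
  rw [Bool.eq_iff_iff]
  rw [show (PySem.Chars.isIn m (PySem.Chars.strip x) = true) ↔ m <:+: PySem.Chars.strip x from
    PySem.Chars.isIn_iff_infix _ _]
  rw [show (PySem.Chars.isIn m x = true) ↔ m <:+: x from PySem.Chars.isIn_iff_infix _ _]
  exact infix_strip m x hm hns

lemma isspace_false_mid (c : Char) (h1 : 33 ≤ c.toNat) (h2 : c.toNat ≤ 126) :
    PySem.Chars.isspace c = false := by
  simp only [PySem.Chars.isspace, Bool.or_eq_false_iff, Bool.and_eq_false_iff,
    decide_eq_false_iff_not]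
  omega

lemma lineOk_strip (l : List Char) : pvLineOk (PySem.Chars.strip l) = pvMatchOf l := by
  unfold pvLineOk pvMatchOf
  rw [lower_strip]
  rw [show ("http://".toList : List Char) = ['h','t','t','p',':','/','/'] from rfl,
    show ("https://".toList : List Char) = ['h','t','t','p','s',':','/','/'] from rfl]
  rw [isIn_strip_marker _ _ (by simp)
        (by intro c hc; fin_cases hc <;> exact isspace_false_mid _ (by simp) (by simp)),
      isIn_strip_marker _ _ (by simp)
        (by intro c hc; fin_cases hc <;> exact isspace_false_mid _ (by simp) (by simp))]

-- A's loop over the split lines, expressed with pvMatchOf on the raw line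
lemma loopA_eq (ls : List (List Char)) :
    pvLoopA ls = ls.all (fun l => PySem.Chars.strip l == [] || pvMatchOf l) := by
  induction ls with
  | nil => rfl
  | cons line rest ih =>
    simp only [pvLoopA, List.all_cons]
    by_cases h : PySem.Chars.strip line = []
    · simp [h, ih]
    · rw [if_neg h, line_check_eq _ (strip_strip line) h, lineOk_strip]
      have hbe : (PySem.Chars.strip line == []) = false := by
        simpa using h
      rw [hbe, Bool.false_or]
      by_cases hok : pvMatchOf line = true
      · simp [hok, ih]
      · simp [Bool.eq_false_iff.mpr hok]

-- B's loop invariant over the chars of one line (no newline among them)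
lemma endswith_takeLast8 (m w : List Char) (hm : m.length ≤ 8) :
    PySem.Chars.endswith (pvTakeLast8 w) m = PySem.Chars.endswith w m := by
  rw [Bool.eq_iff_iff]
  rw [show (PySem.Chars.endswith (pvTakeLast8 w) m = true) ↔ m <:+ pvTakeLast8 w from
    PySem.Chars.endswith_iff _ _]
  rw [show (PySem.Chars.endswith w m = true) ↔ m <:+ w from PySem.Chars.endswith_iff _ _]
  exact suffix_takeLast8 m w hm

lemma isIn_snoc (m s : List Char) (a : Char) :
    PySem.Chars.isIn m (s ++ [a]) =
      (PySem.Chars.isIn m s || PySem.Chars.endswith (s ++ [a]) m) := by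
  rw [Bool.eq_iff_iff, Bool.or_eq_true]
  rw [show (PySem.Chars.isIn m (s ++ [a]) = true) ↔ m <:+: s ++ [a] from
    PySem.Chars.isIn_iff_infix _ _]
  rw [show (PySem.Chars.isIn m s = true) ↔ m <:+: s from PySem.Chars.isIn_iff_infix _ _]
  rw [show (PySem.Chars.endswith (s ++ [a]) m = true) ↔ m <:+ s ++ [a] from
    PySem.Chars.endswith_iff _ _]
  exact infix_snoc m s a

lemma loopB_step (c : Char) (rest : List Char) (seen matched : Bool) (window : List Char)
    (h : ¬ c = '\n') :
    pvLoopB (c :: rest) seen matched window =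
    pvLoopB rest (if !PySem.Chars.isspace c then true else seen)
      (if PySem.Chars.endswith
            (PySem.List.slice (window ++ [PySem.Chars.lowerChar c]) (some (-8)) none)
            "http://".toList ||
          PySem.Chars.endswith
            (PySem.List.slice (window ++ [PySem.Chars.lowerChar c]) (some (-8)) none)
            "https://".toList then true else matched)
      (PySem.List.slice (window ++ [PySem.Chars.lowerChar c]) (some (-8)) none) := by
  rw [pvLoopB, if_neg h]

lemma loopB_no_nl (l : List Char) (hl : '\n' ∉ l) :
    ∀ (tail done : List Char),
    pvLoopB (l ++ tail) (pvSeenOf done) (pvMatchOf done) (pvTakeLast8 (PySem.Chars.lower done)) =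
    pvLoopB tail (pvSeenOf (done ++ l)) (pvMatchOf (done ++ l))
      (pvTakeLast8 (PySem.Chars.lower (done ++ l))) := by
  induction l with
  | nil => intro tail done; simp
  | cons c r ih =>
    intro tail done
    simp only [List.mem_cons, not_or] at hl
    obtain ⟨hc, hr⟩ := hl
    rw [List.cons_append, loopB_step c (r ++ tail) _ _ _ (fun hh => hc hh.symm)]
    have hlow : PySem.Chars.lower (done ++ [c])
        = PySem.Chars.lower done ++ [PySem.Chars.lowerChar c] := by
      simp [PySem.Chars.lower]
    have hseen : (if !PySem.Chars.isspace c then true else pvSeenOf done)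
        = pvSeenOf (done ++ [c]) := by
      cases hsp : PySem.Chars.isspace c <;> simp [pvSeenOf, List.any_append, hsp]
    have hwin : PySem.List.slice (pvTakeLast8 (PySem.Chars.lower done) ++ [PySem.Chars.lowerChar c])
          (some (-8)) none
        = pvTakeLast8 (PySem.Chars.lower (done ++ [c])) := by
      rw [slice_neg8, takeLast8_append, hlow]
    have hmatch : (if PySem.Chars.endswith
            (PySem.List.slice (pvTakeLast8 (PySem.Chars.lower done) ++ [PySem.Chars.lowerChar c])
              (some (-8)) none) "http://".toList ||
          PySem.Chars.endswith
            (PySem.List.slice (pvTakeLast8 (PySem.Chars.lower done) ++ [PySem.Chars.lowerChar c])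
              (some (-8)) none) "https://".toList then true else pvMatchOf done)
        = pvMatchOf (done ++ [c]) := by
      rw [hwin, hlow, endswith_takeLast8 _ _ (by decide), endswith_takeLast8 _ _ (by decide)]
      unfold pvMatchOf
      rw [hlow, isIn_snoc, isIn_snoc]
      cases PySem.Chars.isIn "http://".toList (PySem.Chars.lower done) <;>
        cases PySem.Chars.isIn "https://".toList (PySem.Chars.lower done) <;>
        cases PySem.Chars.endswith (PySem.Chars.lower done ++ [PySem.Chars.lowerChar c])
          "http://".toList <;>
        cases PySem.Chars.endswith (PySem.Chars.lower done ++ [PySem.Chars.lowerChar c])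
          "https://".toList <;> rfl
    rw [hseen, hmatch, hwin]
    have := ih hr tail (done ++ [c])
    rw [List.append_assoc] at this
    simpa using this

lemma any_nonspace_eq (l : List Char) :
    (l.any fun c => !PySem.Chars.isspace c) = !l.all PySem.Chars.isspace := by
  induction l with
  | nil => rfl
  | cons c r ih => cases hsp : PySem.Chars.isspace c <;> simp [hsp, ih]

lemma seenOf_eq (l : List Char) : pvSeenOf l = !(PySem.Chars.strip l == []) := by
  have hall : (PySem.Chars.strip l == []) = l.all PySem.Chars.isspace := by
    rw [Bool.eq_iff_iff, beq_iff_eq, strip_eq_nil_iff]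
  rw [hall]
  exact any_nonspace_eq l

-- B's whole loop equals the per-line conjunction over the split
lemma loopB_start (t : List Char) (tail : List Char) (hl : '\n' ∉ t) :
    pvLoopB (t ++ tail) false false [] =
    pvLoopB tail (pvSeenOf t) (pvMatchOf t) (pvTakeLast8 (PySem.Chars.lower t)) := by
  have h := loopB_no_nl t hl tail []
  have h0s : pvSeenOf ([] : List Char) = false := rfl
  have h0m : pvMatchOf ([] : List Char) = false := by decide
  have h0w : pvTakeLast8 (PySem.Chars.lower ([] : List Char)) = [] := rfl
  rw [h0s, h0m, h0w] at h
  simpa using h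

lemma loopB_main (t : List Char) :
    pvLoopB (t ++ ['\n']) false false [] =
    (pvSpNl t).all (fun l => PySem.Chars.strip l == [] || pvMatchOf l) := by
  suffices H : ∀ (n : Nat) (t : List Char), t.length ≤ n →
      pvLoopB (t ++ ['\n']) false false [] =
      (pvSpNl t).all (fun l => PySem.Chars.strip l == [] || pvMatchOf l) from
    H t.length t le_rfl
  intro n
  induction n with
  | zero =>
    intro t ht
    have : t = [] := List.eq_nil_of_length_eq_zero (by omega)
    subst this
    rfl
  | succ n ih =>
    intro t ht
    by_cases hmem : '\n' ∈ t
    · -- split t at its first newline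
      set a := List.takeWhile (fun c => c != '\n') t with ha
      set rest := List.dropWhile (fun c => c != '\n') t with hrest
      have hna : '\n' ∉ a := by
        intro hin
        have := List.mem_takeWhile_imp hin
        simp at this
      have hrest_ne : rest ≠ [] := by
        intro hnil
        apply absurd hmem
        intro hmem'
        have htad : t = a ++ rest := (List.takeWhile_append_dropWhile ..).symm
        rw [htad, hnil, List.append_nil] at hmem'
        exact hna hmem'
      have hhead : rest.head hrest_ne = '\n' := by
        have h1 := List.head_dropWhile_not (p := fun c => c != '\n') (l := t) (by rw [← hrest]; exact hrest_ne)
        simp only [← hrest] at h1 ⊢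
        simpa using h1
      obtain ⟨b, hb⟩ : ∃ b, rest = '\n' :: b := by
        rcases List.exists_cons_of_ne_nil hrest_ne with ⟨hd, tl, he⟩
        refine ⟨tl, ?_⟩
        have h2 : rest.head? = some '\n' := by
          rw [List.head?_eq_head hrest_ne, hhead]
        rw [he] at h2
        have h3 : hd = '\n' := by simpa using h2
        rw [he, h3]
      have htab : t = a ++ '\n' :: b := by
        rw [← hb, ha, hrest, List.takeWhile_append_dropWhile]
      have hlenb : b.length ≤ n := by
        have := congrArg List.length htab
        simp [List.length_append] at this
        omega
      rw [htab, pvSpNl_append a b hna]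
      have hassoc : (a ++ '\n' :: b) ++ ['\n'] = a ++ ('\n' :: (b ++ ['\n'])) := by
        simp
      rw [hassoc, loopB_start a _ hna, pvLoopB, if_pos rfl]
      rw [seenOf_eq a]
      rw [List.all_cons]
      cases hstrip : (PySem.Chars.strip a == []) <;> cases hm : pvMatchOf a
      · simp
      · simp [ih b hlenb]
      · simp [ih b hlenb]
      · simp [ih b hlenb]
    · rw [pvSpNl_no_nl t hmem, loopB_start t _ hmem, pvLoopB, if_pos rfl]
      rw [seenOf_eq t]
      simp only [List.all_cons, List.all_nil, Bool.and_true]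
      cases hstrip : (PySem.Chars.strip t == []) <;> cases hm : pvMatchOf t <;> simp [pvLoopB]

-- ===== VERDICT (by name: the statement is the Claim_ definition above) =====
theorem is_valid_doc_link_py_spec : Claim_equal_is_valid_doc_link_py := by
  intro value _
  unfold Spec_is_valid_doc_link_py is_valid_doc_link_py is_valid_doc_link_py_alt
  split
  · rfl
  · rw [pvSplitOn_nl, loopA_eq, show ("\n".toList : List Char) = ['\n'] from rfl, loopB_main]
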